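-- pv_equiv track=rewrite | github.com/banana-galaxy/challenges | challenge21(chess_piece_challenge)/solutions/SilverShade.py | solution
-- ===== SOURCE A (Python) =====
-- def solution(a, b, n):
--     a,b=a.lower(),b.lower()
--     if n < 1 and a!=b:return False
--     if a==b:return True
--     r = [[f'{l}{n}' for n in range(1, 9)] for l in 'abcdefgh']
--     bl, i = {}, 0
--     for x in r:
--         c = i
--         for f in x:
--             c = not c
--             bl[f] = c
--         i = not c
--     if bl[a] == bl[b]:
--         if n < 2:
--             i = [[g.index(a), f] for f, g in enumerate(r) if a in g][0]
--             m = [(1, 1), (-1, 1), (-1, -1), (1, -1)]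
--             j = []
--             for l in m:
--                 k = i.copy()
--                 for x in range(9):
--                     try: j.append(r[k[1]][k[0]])
--                     except: pass
--                     k[0] += l[0]
--                     k[1] += l[1]
--                     if any(x < 0 for x in k):
--                         break
--             if b in j: return True
--             else: return False
--         else: return True
--     else: return False
-- ===== SOURCE B (Python) =====
-- def solution(a, b, n):
--     # coordinate arithmetic instead of board construction + ray enumeration
--     a, b = a.lower(), b.lower()
--     if n < 1 and a != b:
--         return False
--     if a == b:
--         return True
--     fa, ra = ord(a[0]) - 97, ord(a[1]) - 49
--     fb, rb = ord(b[0]) - 97, ord(b[1]) - 49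
--     if (fa + ra) % 2 != (fb + rb) % 2:
--         return False
--     return n >= 2 or abs(fa - fb) == abs(ra - rb)
-- ===== Notes on version B (the rewrite author's own statement) =====
-- stated objective: faster
-- what changed: B replaces A's 64-square board construction, colour-dict building and four-direction ray enumeration with direct coordinate arithmetic: colour parity (file+rank)%2 and the diagonal test |df|==|dr|.
import Mathlib
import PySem

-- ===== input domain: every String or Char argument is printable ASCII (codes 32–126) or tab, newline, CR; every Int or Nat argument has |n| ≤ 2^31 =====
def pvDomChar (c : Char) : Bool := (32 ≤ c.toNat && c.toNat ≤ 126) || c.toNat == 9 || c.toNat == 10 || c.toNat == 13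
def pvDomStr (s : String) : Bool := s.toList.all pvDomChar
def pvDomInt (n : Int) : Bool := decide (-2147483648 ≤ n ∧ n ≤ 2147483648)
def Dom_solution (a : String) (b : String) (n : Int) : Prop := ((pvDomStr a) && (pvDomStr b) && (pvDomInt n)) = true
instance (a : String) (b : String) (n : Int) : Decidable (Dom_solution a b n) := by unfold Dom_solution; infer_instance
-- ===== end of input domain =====

-- B replaces A's board construction and four-ray enumeration by direct coordinate
-- arithmetic (colour parity and diagonal distance); equivalence is proved on inputs
-- where A returns (Pre_ excludes the KeyError cases).

-- ===== PORT A =====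

-- r = [[f'{l}{n}' for n in range(1, 9)] for l in 'abcdefgh']
def pvBoardR : List (List String) :=
  "abcdefgh".toList.map (fun l =>
    (PySem.List.pyRange 1 9 1).map (fun n => String.ofList [l] ++ PySem.Int.toStr n))

-- bl, i = {}, 0; for x in r: c = i; for f in x: c = not c; bl[f] = c; i = not c
def pvBl : PySem.Dict String Bool :=
  (pvBoardR.foldl
    (fun (st : PySem.Dict String Bool × Bool) x =>
      let inner := x.foldl (fun (p : PySem.Dict String Bool × Bool) f =>
        let c := !p.2
        (p.1.insert f c, c)) (st.1, st.2)
      (inner.1, !inner.2))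
    (PySem.Dict.empty, false)).1

-- inner 'for x in range(9)' loop with try/except and the any(<0) break, for one direction l
def pvRay (l : Int × Int) : Nat → (Int × Int) → List String → List String
  | 0, _, j => j
  | t + 1, k, j =>
    let j := match PySem.List.pyGet? pvBoardR k.2 with
      | none => j                                   -- except: pass
      | some row => match PySem.List.pyGet? row k.1 with
        | none => j                                 -- except: pass
        | some s => j ++ [s]
    let k := (k.1 + l.1, k.2 + l.2)
    if k.1 < 0 ∨ k.2 < 0 then j else pvRay l t k j

-- body of A after 'a,b = a.lower(), b.lower()'
def pvSolutionCore (a : String) (b : String) (n : Int) : Bool :=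
  if n < 1 ∧ a ≠ b then false
  else if a = b then true
  else
    match pvBl.get? a, pvBl.get? b with
    | some ca, some cb =>                            -- bl[a], bl[b]: KeyError (none) excluded by Pre_
      if ca = cb then
        if n < 2 then
          -- i = [[g.index(a), f] for f, g in enumerate(r) if a in g][0]
          let cand := ((PySem.List.enumerate pvBoardR).filter (fun fg => a ∈ fg.2)).map
            (fun fg => (((PySem.List.index? fg.2 a).getD 0 : Int), fg.1))
          let i := cand.headD (0, 0)
          let m : List (Int × Int) := [(1, 1), (-1, 1), (-1, -1), (1, -1)]
          let j := m.foldl (fun j l => pvRay l 9 i j) []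
          decide (b ∈ j)
        else true
      else false
    | _, _ => false                                  -- unreachable under Pre_ (KeyError in Python)

def solution (a : String) (b : String) (n : Int) : Bool :=
  pvSolutionCore (PySem.Str.lower a) (PySem.Str.lower b) n

-- ===== PORT B =====

-- ord(s[i]) as an Int (s[0]/s[1] exist on every input Pre_ admits down this branch)
def pvOrdAt (s : String) (i : Int) : Int :=
  match PySem.Str.pyGet? s i with
  | some c => (c.toNat : Int)
  | none => 0

-- body of B after 'a,b = a.lower(), b.lower()'
def pvSolutionAltCore (a : String) (b : String) (n : Int) : Bool :=
  if n < 1 ∧ a ≠ b then false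
  else if a = b then true
  else
    let fa := pvOrdAt a 0 - 97
    let ra := pvOrdAt a 1 - 49
    let fb := pvOrdAt b 0 - 97
    let rb := pvOrdAt b 1 - 49
    if PySem.Int.mod (fa + ra) 2 ≠ PySem.Int.mod (fb + rb) 2 then false
    else decide (2 ≤ n) || decide (|fa - fb| = |ra - rb|)

def solution_alt (a : String) (b : String) (n : Int) : Bool :=
  pvSolutionAltCore (PySem.Str.lower a) (PySem.Str.lower b) n

-- ===== PRECONDITION & SPEC =====

-- the 64 board squares, written directly (independent of the ports)
def pvSquares : List String :=
  "abcdefgh".toList.flatMap (fun l => "12345678".toList.map (fun d => String.ofList [l, d]))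

-- Pre_ excludes exactly the inputs on which A raises KeyError: n ≥ 1, the lowered
-- strings differ, and at least one of them is not a square of the 8x8 board.
def Pre_solution (a : String) (b : String) (n : Int) : Prop :=
  (1 ≤ n ∧ PySem.Str.lower a ≠ PySem.Str.lower b) →
    (PySem.Str.lower a ∈ pvSquares ∧ PySem.Str.lower b ∈ pvSquares)
instance (a : String) (b : String) (n : Int) : Decidable (Pre_solution a b n) := by
  unfold Pre_solution; infer_instance

def pvWitness_solution : String × String × Int := ("C1", "a3", 2)

def Spec_solution (a : String) (b : String) (n : Int) (out : Bool) : Prop := out = solution_alt a b n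
instance (a : String) (b : String) (n : Int) (out : Bool) : Decidable (Spec_solution a b n out) := by unfold Spec_solution; infer_instance

-- ===== CLAIM (what is proved, stated in full; the proofs are below) =====
def Claim_equal_solution : Prop := ∀ (a : String) (b : String) (n : Int), Dom_solution a b n → Pre_solution a b n → Spec_solution a b n (solution a b n)

-- ===== LEMMAS AND PROOFS =====

-- on board squares the two cores agree at n = 1 (finite check over the 64x64 pairs)
set_option maxRecDepth 200000 in
theorem pv_core_one : pvSquares.all (fun s => pvSquares.all (fun t =>
    pvSolutionCore s t 1 == pvSolutionAltCore s t 1)) = true := by decide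

-- on board squares the two cores agree at n = 2 (finite check over the 64x64 pairs)
set_option maxRecDepth 200000 in
theorem pv_core_two : pvSquares.all (fun s => pvSquares.all (fun t =>
    pvSolutionCore s t 2 == pvSolutionAltCore s t 2)) = true := by decide

theorem pv_coreA_ge2 (s t : String) (n : Int) (hn : 2 ≤ n) (hst : s ≠ t) :
    pvSolutionCore s t n = pvSolutionCore s t 2 := by
  unfold pvSolutionCore
  have hA : ¬ (n < 1 ∧ s ≠ t) := fun h => absurd h.1 (by omega)
  have hB : ¬ ((2:Int) < 1 ∧ s ≠ t) := fun h => absurd h.1 (by norm_num)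
  rw [if_neg hA, if_neg hB, if_neg hst, if_neg hst]
  rcases pvBl.get? s with _ | ca <;> rcases pvBl.get? t with _ | cb
  · rfl
  · rfl
  · rfl
  · dsimp only
    by_cases hc : ca = cb
    · have hC : ¬ n < 2 := by omega
      have hD : ¬ (2:Int) < 2 := by norm_num
      rw [if_pos hc, if_pos hc, if_neg hC, if_neg hD]
    · rw [if_neg hc, if_neg hc]

theorem pv_coreB_ge2 (s t : String) (n : Int) (hn : 2 ≤ n) (hst : s ≠ t) :
    pvSolutionAltCore s t n = pvSolutionAltCore s t 2 := by
  unfold pvSolutionAltCore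
  have hA : ¬ (n < 1 ∧ s ≠ t) := fun h => absurd h.1 (by omega)
  have hB : ¬ ((2:Int) < 1 ∧ s ≠ t) := fun h => absurd h.1 (by norm_num)
  rw [if_neg hA, if_neg hB, if_neg hst, if_neg hst]
  by_cases hm : PySem.Int.mod (pvOrdAt s 0 - 97 + (pvOrdAt s 1 - 49)) 2 ≠
      PySem.Int.mod (pvOrdAt t 0 - 97 + (pvOrdAt t 1 - 49)) 2
  · rw [if_pos hm, if_pos hm]
  · rw [if_neg hm, if_neg hm, decide_eq_true hn, decide_eq_true (by norm_num : (2:Int) ≤ 2)]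

-- the cores agree on every input the claim admits
theorem pv_core_eq (s t : String) (n : Int)
    (hpre : (1 ≤ n ∧ s ≠ t) → s ∈ pvSquares ∧ t ∈ pvSquares) :
    pvSolutionCore s t n = pvSolutionAltCore s t n := by
  by_cases hst : s = t
  · subst hst
    unfold pvSolutionCore pvSolutionAltCore
    have hE : ¬ (n < 1 ∧ s ≠ s) := fun h => h.2 rfl
    rw [if_neg hE, if_neg hE, if_pos rfl, if_pos rfl]
  · by_cases hn : n < 1
    · rw [pvSolutionCore, pvSolutionAltCore, if_pos ⟨hn, hst⟩, if_pos ⟨hn, hst⟩]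
    · obtain ⟨hsa, hsb⟩ := hpre ⟨by omega, hst⟩
      have h1 := List.all_eq_true.mp pv_core_one
      have h2 := List.all_eq_true.mp pv_core_two
      by_cases h2n : n < 2
      · have hn1 : n = 1 := by omega
        subst hn1
        exact eq_of_beq (List.all_eq_true.mp (h1 s hsa) t hsb)
      · rw [pv_coreA_ge2 s t n (by omega) hst, pv_coreB_ge2 s t n (by omega) hst]
        exact eq_of_beq (List.all_eq_true.mp (h2 s hsa) t hsb)

-- ===== VERDICT (by name: the statement is the Claim_ definition above) =====
theorem solution_spec : Claim_equal_solution := by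
  intro a b n _ hpre
  exact pv_core_eq (PySem.Str.lower a) (PySem.Str.lower b) n hpre
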